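-- pv_equiv track=rewrite | github.com/ransona/preprocess_py | split_meso_rois.py | calculate_roi_ranges_from_heights
-- ===== SOURCE A (Python) =====
-- def calculate_roi_ranges_from_heights(roi_heights, spacer_pixels=0):
--     """
--     Converts a list of ROI heights and a spacer size into
--     a list of [start_row, end_row] pairs for each ROI.
--
--     Args:
--         roi_heights (list[int]): Height in pixels of each ROI.
--         spacer_pixels (int): Number of pixels between ROIs.
--
--     Returns:
--         list[list[int, int]]: ROI Y-coordinate start/end rows.
--     """
--     roi_ranges = []
--     current_start = 0
--
--     for height in roi_heights:
--         start = current_start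
--         end = start + height
--         roi_ranges.append([start, end])
--         current_start = end + spacer_pixels
--
--     return roi_ranges
-- ===== SOURCE B (Python) =====
-- def calculate_roi_ranges_from_heights(roi_heights, spacer_pixels=0):
--     # Prefix-sum table of the heights alone; the spacer contribution is the
--     # arithmetic term i * spacer_pixels, so no running start is maintained.
--     prefix = [0]
--     total = 0
--     for h in roi_heights:
--         total += h
--         prefix.append(total)
--     return [[p + i * spacer_pixels, p + h + i * spacer_pixels]
--             for i, (p, h) in enumerate(zip(prefix, roi_heights))]
-- ===== Notes on version B (the rewrite author's own statement) =====
-- stated objective: alternative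
-- what changed: Replaced the running-start accumulator loop by a prefix-sum table of the heights plus an enumerate/zip mapping pass that adds the spacer arithmetically as i*spacer_pixels.
import Mathlib
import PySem

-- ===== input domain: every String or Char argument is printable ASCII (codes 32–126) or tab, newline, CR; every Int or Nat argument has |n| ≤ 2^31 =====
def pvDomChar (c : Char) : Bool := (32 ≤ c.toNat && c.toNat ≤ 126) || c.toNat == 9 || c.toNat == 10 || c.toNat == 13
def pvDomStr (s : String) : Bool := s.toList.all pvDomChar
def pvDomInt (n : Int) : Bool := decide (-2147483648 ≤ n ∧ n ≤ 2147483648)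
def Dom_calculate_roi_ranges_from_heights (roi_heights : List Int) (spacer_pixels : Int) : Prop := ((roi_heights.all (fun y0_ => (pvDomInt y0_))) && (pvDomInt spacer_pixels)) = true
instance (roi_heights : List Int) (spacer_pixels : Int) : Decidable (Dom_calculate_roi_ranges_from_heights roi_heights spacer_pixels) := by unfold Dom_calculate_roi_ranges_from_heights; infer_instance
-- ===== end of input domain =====

-- B replaces A's running-start accumulator with a prefix-sum table of the heights
-- plus an enumerate/zip mapping pass (spacer added arithmetically as i*spacer); alternative decomposition, same cost.

-- ===== PORT A =====
-- literal port of A: one fold carrying (roi_ranges, current_start)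
def calculate_roi_ranges_from_heights (roi_heights : List Int) (spacer_pixels : Int) : List (List Int) :=
  (roi_heights.foldl
    (fun (st : List (List Int) × Int) height =>
      (st.1 ++ [[st.2, st.2 + height]], st.2 + height + spacer_pixels))
    (([] : List (List Int)), (0 : Int))).1

-- ===== PORT B =====
-- literal port of Source B: build the prefix-sum table (state = (prefix table, total)),
-- then map over enumerate(zip(prefix, roi_heights))
def calculate_roi_ranges_from_heights_alt (roi_heights : List Int) (spacer_pixels : Int) : List (List Int) :=
  let prefixTable :=
    (roi_heights.foldl
      (fun (st : List Int × Int) h => (st.1 ++ [st.2 + h], st.2 + h))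
      (([(0 : Int)]), (0 : Int))).1
  (PySem.List.enumerate (prefixTable.zip roi_heights) 0).map
    (fun ih => [ih.2.1 + ih.1 * spacer_pixels, ih.2.1 + ih.2.2 + ih.1 * spacer_pixels])

-- ===== PRECONDITION & SPEC =====
def Spec_calculate_roi_ranges_from_heights (roi_heights : List Int) (spacer_pixels : Int) (out : List (List Int)) : Prop := out = calculate_roi_ranges_from_heights_alt roi_heights spacer_pixels
instance (roi_heights : List Int) (spacer_pixels : Int) (out : List (List Int)) : Decidable (Spec_calculate_roi_ranges_from_heights roi_heights spacer_pixels out) := by unfold Spec_calculate_roi_ranges_from_heights; infer_instance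

-- ===== CLAIM (what is proved, stated in full; the proofs are below) =====
def Claim_equal_calculate_roi_ranges_from_heights : Prop := ∀ (roi_heights : List Int) (spacer_pixels : Int), Dom_calculate_roi_ranges_from_heights roi_heights spacer_pixels → Spec_calculate_roi_ranges_from_heights roi_heights spacer_pixels (calculate_roi_ranges_from_heights roi_heights spacer_pixels)

-- ===== LEMMAS AND PROOFS =====

-- partial sums of the heights starting from total t (the tail of B's prefix table)
def pvPsums (t : Int) : List Int → List Int
  | [] => []
  | h :: tl => (t + h) :: pvPsums (t + h) tl

-- A's result starting from current_start c
def pvGA (sp c : Int) : List Int → List (List Int)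
  | [] => []
  | h :: tl => [c, c + h] :: pvGA sp (c + h + sp) tl

theorem pvA_fold (sp : Int) : ∀ (hs : List Int) (acc : List (List Int)) (c : Int),
    (hs.foldl (fun (st : List (List Int) × Int) height =>
        (st.1 ++ [[st.2, st.2 + height]], st.2 + height + sp)) (acc, c)).1
      = acc ++ pvGA sp c hs := by
  intro hs
  induction hs with
  | nil => intro acc c; simp [pvGA]
  | cons h tl ih => intro acc c; simp [pvGA, ih]

theorem pvPrefix_fold : ∀ (hs : List Int) (acc : List Int) (t : Int),
    (hs.foldl (fun (st : List Int × Int) h => (st.1 ++ [st.2 + h], st.2 + h)) (acc, t)).1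
      = acc ++ pvPsums t hs := by
  intro hs
  induction hs with
  | nil => intro acc t; simp [pvPsums]
  | cons h tl ih => intro acc t; simp [pvPsums, ih]

theorem pvB_main (sp : Int) : ∀ (hs : List Int) (t k : Int),
    (PySem.List.enumerate (((t :: pvPsums t hs).zip hs)) k).map
        (fun ih => [ih.2.1 + ih.1 * sp, ih.2.1 + ih.2.2 + ih.1 * sp])
      = pvGA sp (t + k * sp) hs := by
  intro hs
  induction hs with
  | nil => intro t k; simp [pvPsums, pvGA, PySem.List.enumerate_nil]
  | cons h tl ih =>
      intro t k
      simp only [pvPsums, pvGA, List.zip_cons_cons, PySem.List.enumerate_cons, List.map_cons]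
      rw [ih (t + h) (k + 1)]
      have e1 : t + h + k * sp = t + k * sp + h := by ring
      have e2 : t + h + (k + 1) * sp = t + k * sp + h + sp := by ring
      rw [e1, e2]

-- ===== VERDICT (by name: the statement is the Claim_ definition above) =====
theorem calculate_roi_ranges_from_heights_spec : Claim_equal_calculate_roi_ranges_from_heights := by
  intro hs sp _
  show calculate_roi_ranges_from_heights hs sp = calculate_roi_ranges_from_heights_alt hs sp
  unfold calculate_roi_ranges_from_heights calculate_roi_ranges_from_heights_alt
  rw [pvA_fold sp hs [] 0, pvPrefix_fold hs [0] 0]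
  have := pvB_main sp hs 0 0
  simp only [List.singleton_append, zero_add, zero_mul] at this ⊢
  rw [this]
  simp
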